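-- pv_equiv track=rewrite | github.com/akimov246/leetcode | 2579. Count Total Number of Colored Cells.py | coloredCells
-- ===== SOURCE A (Python) =====
-- def coloredCells(n: int) -> int:
--     def helper(n):
--         counter = 1
--         result = 1
--         while counter != n + 1:
--             result = result + 4 * (counter - 1)
--             counter += 1
--         return result
--
--     return helper(n)
-- ===== SOURCE B (Python) =====
-- def coloredCells(n: int) -> int:
--     # Closed form: cells after n steps form a diamond of size 2n^2 - 2n + 1.
--     return 2 * n * n - 2 * n + 1
-- ===== Notes on version B (the rewrite author's own statement) =====
-- stated objective: faster
-- what changed: Replaced A's O(n) accumulation loop (adding 4*(k-1) per step) with the closed-form formula 2n^2-2n+1.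
import Mathlib
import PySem

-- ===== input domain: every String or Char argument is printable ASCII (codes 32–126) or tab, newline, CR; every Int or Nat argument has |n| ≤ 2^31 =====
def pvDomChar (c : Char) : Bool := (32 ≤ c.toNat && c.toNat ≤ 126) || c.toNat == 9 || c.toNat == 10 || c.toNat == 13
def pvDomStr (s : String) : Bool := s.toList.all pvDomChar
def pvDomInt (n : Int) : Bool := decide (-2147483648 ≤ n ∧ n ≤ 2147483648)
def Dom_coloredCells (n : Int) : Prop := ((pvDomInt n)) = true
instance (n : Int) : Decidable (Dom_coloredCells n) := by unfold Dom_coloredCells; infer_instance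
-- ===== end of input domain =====

-- B replaces A's O(n) loop with the closed form 2n^2-2n+1; return values agree on all n ≥ 0.

-- ===== PORT A =====
-- A's while loop `while counter != n+1: result += 4*(counter-1); counter += 1`.
-- The `counter < target` guard only makes the recursion total: Python diverges when
-- counter overshoots target (n < 0), and Pre_ excludes exactly those inputs.
def coloredCellsLoop (target counter result : Int) : Int :=
  if counter = target then result
  else if h : counter < target then
    coloredCellsLoop target (counter + 1) (result + 4 * (counter - 1))
  else result
termination_by (target - counter).toNat
decreasing_by omega

def coloredCells (n : Int) : Int := coloredCellsLoop (n + 1) 1 1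

-- ===== PORT B =====
def coloredCells_alt (n : Int) : Int := 2 * n * n - 2 * n + 1

-- ===== PRECONDITION & SPEC =====
-- Pre_ excludes n < 0, on which A's while loop never terminates (counter starts at 1 and never equals n+1).
def Pre_coloredCells (n : Int) : Prop := 0 ≤ n
instance (n : Int) : Decidable (Pre_coloredCells n) := by unfold Pre_coloredCells; infer_instance
def pvWitness_coloredCells : Int := (3)

def Spec_coloredCells (n : Int) (out : Int) : Prop := out = coloredCells_alt n
instance (n : Int) (out : Int) : Decidable (Spec_coloredCells n out) := by unfold Spec_coloredCells; infer_instance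

-- ===== CLAIM =====
def Claim_equal_coloredCells : Prop := ∀ (n : Int), Dom_coloredCells n → Pre_coloredCells n → Spec_coloredCells n (coloredCells n)

-- ===== LEMMAS AND PROOFS =====
-- Invariant of A's loop: starting from counter c with k steps to go (target = c + k),
-- the loop adds Σ_{i=0}^{k-1} 4*(c-1+i) = 4k(c-1) + 2k(k-1) to result.
theorem coloredCellsLoop_eq (k : Nat) : ∀ (c r : Int),
    coloredCellsLoop (c + k) c r = r + 4 * k * (c - 1) + 2 * k * (k - 1) := by
  induction k with
  | zero => intro c r; rw [coloredCellsLoop]; simp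
  | succ k ih =>
    intro c r
    rw [coloredCellsLoop]
    have hne : c ≠ c + (k + 1 : Nat) := by push_cast; omega
    have hlt : c < c + (k + 1 : Nat) := by push_cast; omega
    rw [if_neg hne, dif_pos hlt]
    have : c + ((k + 1 : Nat) : Int) = (c + 1) + (k : Nat) := by push_cast; ring
    rw [this, ih (c + 1) (r + 4 * (c - 1))]
    push_cast; ring

-- ===== VERDICT =====
theorem coloredCells_spec : Claim_equal_coloredCells := by
  intro n _ hn
  have hn' : 0 ≤ n := hn
  unfold Spec_coloredCells coloredCells coloredCells_alt
  have hk : n + 1 = (1 : Int) + (n.toNat : Int) := by omega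
  rw [hk, coloredCellsLoop_eq n.toNat 1 1]
  have : ((n.toNat : Int)) = n := by omega
  rw [this]; ring
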